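-- pv_equiv track=rewrite | github.com/amymhaddad/cs_and_programming_using_python | final_recursion_exercises.py | skip_third_letter
-- ===== SOURCE A (Python) =====
-- def skip_third_letter(phrase):
--     if phrase == '':
--         return ''
--     else:
--         phrase_as_list = phrase.split(' ')
--         new_phrase = phrase_as_list[0][:2] + phrase_as_list[0][3:]
--         updated_phrase = " ".join(phrase_as_list[1:])
--
--         return new_phrase + ' ' + skip_third_letter(updated_phrase)
-- ===== SOURCE B (Python) =====
-- def skip_third_letter(phrase):
--     if phrase == '':
--         return ''
--     tokens = phrase.split(' ')
--     if tokens[-1] == '':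
--         tokens = tokens[:-1]
--     return ''.join(w[:2] + w[3:] + ' ' for w in tokens)
-- ===== Notes on version B (the rewrite author's own statement) =====
-- stated objective: faster
-- what changed: Replaced A's recursion that re-joins and re-splits the remaining words at every step with a single split followed by one pass (dropping the one trailing empty token A's base case drops), building the result with one join.
import Mathlib
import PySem

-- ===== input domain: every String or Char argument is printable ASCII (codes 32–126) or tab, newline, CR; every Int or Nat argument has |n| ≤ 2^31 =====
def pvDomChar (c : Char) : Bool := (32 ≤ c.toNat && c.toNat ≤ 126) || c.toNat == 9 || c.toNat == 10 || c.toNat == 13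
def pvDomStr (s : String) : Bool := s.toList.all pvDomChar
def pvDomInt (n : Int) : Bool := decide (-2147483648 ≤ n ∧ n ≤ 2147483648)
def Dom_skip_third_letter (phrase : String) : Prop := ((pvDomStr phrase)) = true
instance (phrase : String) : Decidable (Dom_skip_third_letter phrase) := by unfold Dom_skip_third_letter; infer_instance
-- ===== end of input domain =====

-- B replaces A's re-join/re-split recursion by one split and a single pass over the words.


-- ===== PORT A =====
-- pvSpl is a structural restatement of PySem.Chars.splitOn with sep = [' '] (proved equal in
-- pvSplitOn_eq below); it exists only so the termination of goA can be proved.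
def pvSpl : List Char → List Char → List (List Char)
  | [], cur => [cur.reverse]
  | c :: rest, cur => if c = ' ' then cur.reverse :: pvSpl rest [] else pvSpl rest (c :: cur)

theorem pvSpl_space (rest cur : List Char) :
    pvSpl (' ' :: rest) cur = cur.reverse :: pvSpl rest [] := by simp [pvSpl]

theorem pvSpl_nonspace {c : Char} (hc : c ≠ ' ') (rest cur : List Char) :
    pvSpl (c :: rest) cur = pvSpl rest (c :: cur) := by simp [pvSpl, hc]

theorem pvSpl_shape (l cur : List Char) : ∃ a as, pvSpl l cur = a :: as := by
  induction l generalizing cur with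
  | nil => exact ⟨_, _, rfl⟩
  | cons c rest ih =>
    by_cases hc : c = ' '
    · subst hc; exact ⟨_, _, pvSpl_space rest cur⟩
    · obtain ⟨a, as, hh⟩ := ih (c :: cur)
      exact ⟨a, as, by rw [pvSpl_nonspace hc, hh]⟩

theorem pvSpl_go (fuel : Nat) (l cur : List Char) (acc : List (List Char))
    (h : l.length < fuel) :
    PySem.Chars.splitOn.go [' '] fuel l cur acc = acc.reverse ++ pvSpl l cur := by
  induction fuel generalizing l cur acc with
  | zero => omega
  | succ n ih =>
    cases l with
    | nil => simp [PySem.Chars.splitOn.go, pvSpl]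
    | cons c rest =>
      have hlen : rest.length < n := by simp at h; omega
      by_cases hc : c = ' '
      · subst hc
        rw [PySem.Chars.splitOn.go]
        have hpre : ([' '].isPrefixOf (' ' :: rest)) = true := by simp [List.isPrefixOf]
        rw [hpre, if_pos rfl]
        rw [ih _ _ _ (by simpa using hlen)]
        rw [pvSpl_space]
        simp
      · rw [PySem.Chars.splitOn.go]
        have hpre : ([' '].isPrefixOf (c :: rest)) = false := by
          simp [List.isPrefixOf]; exact fun hcc => (hc hcc.symm).elim
        rw [hpre, if_neg (by simp)]
        rw [ih _ _ _ hlen]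
        rw [pvSpl_nonspace hc]

theorem pvSplitOn_eq (s : List Char) : PySem.Chars.splitOn s [' '] = pvSpl s [] := by
  have := pvSpl_go (s.length + 1) s [] [] (by omega)
  simpa [PySem.Chars.splitOn] using this

-- round trip: joining the split pieces with ' ' gives the string back
theorem pvJoin_pvSpl (l cur : List Char) :
    PySem.Chars.join [' '] (pvSpl l cur) = cur.reverse ++ l := by
  induction l generalizing cur with
  | nil => simp [pvSpl, PySem.Chars.join, List.intercalate]
  | cons c rest ih =>
    by_cases hc : c = ' '
    · subst hc
      obtain ⟨a, as, hsh⟩ := pvSpl_shape rest []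
      rw [pvSpl_space, hsh, PySem.Chars.join_cons_cons, ← hsh, ih]
      simp
    · rw [pvSpl_nonspace hc, ih]
      simp

theorem pv_updated_lt (s : List Char) (hs : ¬ s = []) :
    (PySem.Chars.join [' '] (PySem.List.slice (PySem.Chars.splitOn s [' ']) (some 1) none)).length
      < s.length := by
  rw [pvSplitOn_eq]
  have hsl : PySem.List.slice (pvSpl s []) (some 1) none = (pvSpl s []).drop 1 :=
    PySem.List.slice_from_natCast _ 1
  rw [hsl]
  obtain ⟨a, as, hsh⟩ := pvSpl_shape s []
  have hjoin := pvJoin_pvSpl s []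
  rw [hsh] at hjoin ⊢
  cases as with
  | nil =>
    simp only [List.drop_succ_cons, List.drop_zero, PySem.Chars.join_nil, List.length_nil]
    have : s ≠ [] := hs
    exact List.length_pos_iff.mpr this
  | cons b bs =>
    rw [PySem.Chars.join_cons_cons] at hjoin
    simp only [List.drop_succ_cons, List.drop_zero]
    have := congrArg List.length hjoin
    simp at this
    omega

-- literal port of A's recursion; phrase_as_list[0] is headD [] (split(' ') never returns an empty list)
def goA (s : List Char) : List Char :=
  if h : s = [] then []
  else
    let parts := PySem.Chars.splitOn s [' ']
    let w := parts.headD []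
    let new_phrase := PySem.List.slice w none (some 2) ++ PySem.List.slice w (some 3) none
    let updated := PySem.Chars.join [' '] (PySem.List.slice parts (some 1) none)
    new_phrase ++ [' '] ++ goA updated
termination_by s.length
decreasing_by exact pv_updated_lt s h

def skip_third_letter (phrase : String) : String := String.mk (goA phrase.toList)

-- ===== PORT B =====
def skip_third_letter_alt (phrase : String) : String :=
  if phrase == "" then ""
  else
    let tokens := PySem.Chars.splitOn phrase.toList [' ']
    let tokens2 := if PySem.List.pyGet? tokens (-1) = some [] then PySem.List.slice tokens none (some (-1)) else tokens
    String.mk (PySem.Chars.join []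
      (tokens2.map (fun w => PySem.List.slice w none (some 2) ++ PySem.List.slice w (some 3) none ++ [' '])))

-- ===== PRECONDITION & SPEC =====
def Spec_skip_third_letter (phrase : String) (out : String) : Prop := out = skip_third_letter_alt phrase
instance (phrase : String) (out : String) : Decidable (Spec_skip_third_letter phrase out) := by unfold Spec_skip_third_letter; infer_instance

-- ===== CLAIM (what is proved, stated in full; the proofs are below) =====
def Claim_equal_skip_third_letter : Prop := ∀ (phrase : String), Dom_skip_third_letter phrase → Spec_skip_third_letter phrase (skip_third_letter phrase)

-- ===== LEMMAS AND PROOFS =====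

theorem pv_slice_take2 (w : List Char) : PySem.List.slice w none (some 2) = w.take 2 :=
  PySem.List.slice_to_natCast w 2

theorem pv_slice_drop3 (w : List Char) : PySem.List.slice w (some 3) none = w.drop 3 :=
  PySem.List.slice_from_natCast w 3

theorem pv_slice_tail (l : List (List Char)) : PySem.List.slice l (some 1) none = l.drop 1 :=
  PySem.List.slice_from_natCast l 1

theorem pvSpl_no_space (l cur : List Char) (hcur : ' ' ∉ cur) :
    ∀ t ∈ pvSpl l cur, ' ' ∉ t := by
  induction l generalizing cur with
  | nil =>
    intro t ht
    simp only [pvSpl, List.mem_singleton] at ht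
    subst ht; simpa using hcur
  | cons c rest ih =>
    intro t ht
    by_cases hc : c = ' '
    · subst hc
      rw [pvSpl_space] at ht
      rcases List.mem_cons.mp ht with h1 | h1
      · subst h1; simpa using hcur
      · exact ih [] (by simp) t h1
    · rw [pvSpl_nonspace hc] at ht
      refine ih (c :: cur) ?_ t ht
      intro hmem
      rcases List.mem_cons.mp hmem with h1 | h1
      · exact hc h1.symm
      · exact hcur h1

theorem pvSpl_append_token (t : List Char) (ht : ' ' ∉ t) (l cur : List Char) :
    pvSpl (t ++ l) cur = pvSpl l (t.reverse ++ cur) := by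
  induction t generalizing cur with
  | nil => simp
  | cons c cs ih =>
    have hc : c ≠ ' ' := fun h => ht (by simp [h])
    rw [List.cons_append, pvSpl_nonspace hc, ih (fun h => ht (by simp [h]))]
    simp

theorem pvSpl_join (ts : List (List Char)) (hts : ts ≠ []) (hsf : ∀ t ∈ ts, ' ' ∉ t) :
    pvSpl (PySem.Chars.join [' '] ts) [] = ts := by
  induction ts with
  | nil => exact absurd rfl hts
  | cons t rest ih =>
    cases rest with
    | nil =>
      have : PySem.Chars.join [' '] [t] = t := by simp [PySem.Chars.join, List.intercalate]
      rw [this]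
      have := pvSpl_append_token t (hsf t (by simp)) [] []
      simpa [pvSpl] using this
    | cons r rs =>
      rw [PySem.Chars.join_cons_cons]
      have h1 : t ++ [' '] ++ PySem.Chars.join [' '] (r :: rs)
          = t ++ (' ' :: PySem.Chars.join [' '] (r :: rs)) := by simp
      rw [h1, pvSpl_append_token t (hsf t (by simp)), pvSpl_space]
      simp only [List.append_nil, List.reverse_reverse]
      rw [ih (by simp) (fun x hx => hsf x (List.mem_cons_of_mem _ hx))]

theorem goA_join (ts : List (List Char)) (hts : ts ≠ []) (hsf : ∀ t ∈ ts, ' ' ∉ t) :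
    goA (PySem.Chars.join [' '] ts)
      = (if ts.getLast? = some [] then ts.dropLast else ts).flatMap
          (fun w => (w.take 2 ++ w.drop 3) ++ [' ']) := by
  induction ts with
  | nil => exact absurd rfl hts
  | cons t rest ih =>
    cases rest with
    | nil =>
      have hj : PySem.Chars.join [' '] [t] = t := by simp [PySem.Chars.join, List.intercalate]
      rw [hj]
      by_cases h0 : t = []
      · subst h0; simp [goA]
      · rw [goA]
        rw [dif_neg h0]
        have hspl : PySem.Chars.splitOn t [' '] = [t] := by
          rw [pvSplitOn_eq]
          have := pvSpl_append_token t (hsf t (by simp)) [] []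
          simpa [pvSpl] using this
        rw [hspl]
        dsimp only
        rw [pv_slice_tail]
        simp only [List.headD_cons, List.drop_succ_cons, List.drop_zero, PySem.Chars.join_nil]
        rw [goA]
        rw [pv_slice_take2, pv_slice_drop3]
        simp [h0]
    | cons r rs =>
      rw [PySem.Chars.join_cons_cons]
      have hne : (t ++ [' '] ++ PySem.Chars.join [' '] (r :: rs)) ≠ [] := by simp
      rw [goA, dif_neg hne]
      have hspl : PySem.Chars.splitOn (t ++ [' '] ++ PySem.Chars.join [' '] (r :: rs)) [' ']
          = t :: r :: rs := by
        rw [pvSplitOn_eq]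
        have h1 : t ++ [' '] ++ PySem.Chars.join [' '] (r :: rs)
            = t ++ (' ' :: PySem.Chars.join [' '] (r :: rs)) := by simp
        rw [h1, pvSpl_append_token t (hsf t (by simp)), pvSpl_space]
        simp only [List.append_nil, List.reverse_reverse]
        rw [pvSpl_join (r :: rs) (by simp) (fun x hx => hsf x (List.mem_cons_of_mem _ hx))]
      rw [hspl]
      dsimp only
      rw [pv_slice_tail]
      simp only [List.headD_cons, List.drop_succ_cons, List.drop_zero]
      rw [ih (by simp) (fun x hx => hsf x (List.mem_cons_of_mem _ hx))]
      rw [pv_slice_take2, pv_slice_drop3]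
      have hgl : (t :: r :: rs).getLast? = (r :: rs).getLast? := by
        simp [List.getLast?_cons_cons]
      rw [hgl]
      by_cases hl : (r :: rs).getLast? = some ([] : List Char)
      · rw [if_pos hl, if_pos hl]
        have hdl : (t :: r :: rs).dropLast = t :: (r :: rs).dropLast :=
          List.dropLast_cons_of_ne_nil (by simp)
        rw [hdl]
        simp
      · rw [if_neg hl, if_neg hl]
        simp

theorem pyGet?_neg_one_eq_getLast? {α : Type} (xs : List α) (h : xs ≠ []) :
    PySem.List.pyGet? xs (-1) = xs.getLast? := by
  have hl : 1 ≤ xs.length := List.length_pos_iff.mpr h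
  simp [PySem.List.pyGet?, PySem.List.pyIdx?, hl, List.getLast?_eq_getElem?]

theorem pvJoin_nil_eq_flatten (l : List (List Char)) : PySem.Chars.join [] l = l.flatten := by
  induction l with
  | nil => simp [PySem.Chars.join, List.intercalate]
  | cons a t ih =>
    cases t with
    | nil => simp [PySem.Chars.join, List.intercalate]
    | cons b r => rw [PySem.Chars.join_cons_cons]; simp_all

-- ===== VERDICT (by name: the statement is the Claim_ definition above) =====
theorem skip_third_letter_spec : Claim_equal_skip_third_letter := by
  unfold Claim_equal_skip_third_letter
  intro phrase _
  unfold Spec_skip_third_letter skip_third_letter skip_third_letter_alt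
  by_cases h : phrase = ""
  · subst h
    simp only [beq_self_eq_true, if_pos]
    rw [goA]
    rfl
  · have hb : (phrase == "") = false := by simpa using h
    rw [hb, if_neg Bool.false_ne_true]
    have hne : phrase.toList ≠ [] := by
      intro hc
      exact h (String.toList_eq_nil_iff.mp hc)
    set ts := PySem.Chars.splitOn phrase.toList [' '] with hts
    have htsne : ts ≠ [] := by
      rw [hts, pvSplitOn_eq]
      obtain ⟨a, as, hsh⟩ := pvSpl_shape phrase.toList []
      rw [hsh]; simp
    have hsf : ∀ t ∈ ts, ' ' ∉ t := by
      rw [hts, pvSplitOn_eq]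
      exact pvSpl_no_space phrase.toList [] (by simp)
    have hjoin : PySem.Chars.join [' '] ts = phrase.toList := by
      rw [hts, pvSplitOn_eq]; simpa using pvJoin_pvSpl phrase.toList []
    have hmain := goA_join ts htsne hsf
    rw [hjoin] at hmain
    apply congrArg String.mk
    rw [hmain]
    rw [pyGet?_neg_one_eq_getLast? ts htsne, PySem.List.slice_to_neg_one]
    have hfin : ∀ X : List (List Char),
        X.flatMap (fun w => (w.take 2 ++ w.drop 3) ++ [' '])
          = PySem.Chars.join []
              (X.map (fun w => PySem.List.slice w none (some 2) ++ PySem.List.slice w (some 3) none ++ [' '])) := by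
      intro X
      rw [pvJoin_nil_eq_flatten, List.flatMap_def]
      congr 1
      apply List.map_congr_left
      intro w _
      rw [pv_slice_take2, pv_slice_drop3]
    by_cases hl : ts.getLast? = some ([] : List Char)
    · rw [if_pos hl]
      exact hfin _
    · rw [if_neg hl]
      exact hfin _
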